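-- pv_equiv track=rewrite | github.com/sybrendeuzeman/AoC2024 | 7/puzzle_7.py | check_potential_solution
-- ===== SOURCE A (Python) =====
-- def check_potential_solution(list_numbers, solution_test):
--     # Initialize list
--     list_partial_solutions = [list_numbers[0]]
--
--     # Go through list of numbers and make new partial solution
--     for number in list_numbers[1:len(list_numbers)]:
--         # Add number to the list
--         list_add = [
--             partial + number
--             for partial
--             in list_partial_solutions
--             if partial <= solution_test # Check if partial is not already over the solution_test
--         ]
--
--         # Multiply with number
--         list_multiplication = [
--             partial * number
--             for partial
--             in list_partial_solutions
--             if partial <= solution_test # Check if partial is not already over the solution_test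
--         ]
--
--         list_partial_solutions = list_add + list_multiplication # add lists together
--     # Return boolean whether solution test is in the list with partial solutions
--     return solution_test in list_partial_solutions
-- ===== SOURCE B (Python) =====
-- def check_potential_solution(list_numbers, solution_test):
--     # Depth-first search with short-circuit: extend one running value at a time,
--     # pruning any branch whose running value already exceeds the target.
--     def go(acc, i):
--         if i == len(list_numbers):
--             return acc == solution_test
--         if acc > solution_test:
--             return False
--         n = list_numbers[i]
--         return go(acc + n, i + 1) or go(acc * n, i + 1)
--     return go(list_numbers[0], 1)
-- ===== Notes on version B (the rewrite author's own statement) =====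
-- stated objective: alternative
-- what changed: Replaces A's breadth-first staged construction of whole lists of partial values (add-list plus multiply-list concatenated each round, membership test at the end) with a recursive depth-first search that carries a single running value, prunes a branch as soon as it exceeds the target, and short-circuits on the first success.
-- outside the precondition, e.g. on check_potential_solution([], 5): A raises IndexError, B raises IndexError
import Mathlib
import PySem

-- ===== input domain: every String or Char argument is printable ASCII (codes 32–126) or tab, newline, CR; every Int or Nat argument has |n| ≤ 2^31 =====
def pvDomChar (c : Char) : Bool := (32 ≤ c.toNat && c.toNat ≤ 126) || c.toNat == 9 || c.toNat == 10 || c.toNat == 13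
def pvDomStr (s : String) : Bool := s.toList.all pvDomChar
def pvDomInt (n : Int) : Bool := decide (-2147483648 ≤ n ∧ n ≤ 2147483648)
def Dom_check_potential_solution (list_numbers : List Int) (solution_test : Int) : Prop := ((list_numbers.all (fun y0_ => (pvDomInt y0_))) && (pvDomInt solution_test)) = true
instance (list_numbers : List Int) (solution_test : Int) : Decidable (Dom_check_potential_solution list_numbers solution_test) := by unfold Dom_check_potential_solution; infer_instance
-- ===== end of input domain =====

-- B replaces A's breadth-first staged lists of partial values with a short-circuiting
-- depth-first search over a single running value (same pruning, O(n) memory).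
-- ===== PORT A =====
def check_potential_solution (list_numbers : List Int) (solution_test : Int) : Bool :=
  match list_numbers with
  | [] => false   -- Python raises IndexError on list_numbers[0]; excluded by Pre_
  | x :: rest =>
    let final := rest.foldl (fun ps number =>
      ((ps.filter (fun p => p ≤ solution_test)).map (fun p => p + number)) ++
      ((ps.filter (fun p => p ≤ solution_test)).map (fun p => p * number))) [x]
    decide (solution_test ∈ final)

-- ===== PORT B =====
-- B's helper 'go(acc, i)': structural recursion on the remaining numbers.
def cpsGo (t : Int) : Int → List Int → Bool
  | acc, [] => decide (acc = t)
  | acc, n :: rest =>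
    if acc > t then false
    else cpsGo t (acc + n) rest || cpsGo t (acc * n) rest

def check_potential_solution_alt (list_numbers : List Int) (solution_test : Int) : Bool :=
  match list_numbers with
  | [] => false   -- IndexError in Python; excluded by Pre_
  | x :: rest => cpsGo solution_test x rest

-- ===== PRECONDITION & SPEC =====
-- Pre_ excludes only the empty list, on which Python A raises IndexError.
def Pre_check_potential_solution (list_numbers : List Int) (solution_test : Int) : Prop := list_numbers ≠ []
instance (list_numbers : List Int) (solution_test : Int) : Decidable (Pre_check_potential_solution list_numbers solution_test) := by unfold Pre_check_potential_solution; infer_instance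
def pvWitness_check_potential_solution : List Int × Int := ([2, 3, 4], 20)
def Spec_check_potential_solution (list_numbers : List Int) (solution_test : Int) (out : Bool) : Prop := out = check_potential_solution_alt list_numbers solution_test
instance (list_numbers : List Int) (solution_test : Int) (out : Bool) : Decidable (Spec_check_potential_solution list_numbers solution_test out) := by unfold Spec_check_potential_solution; infer_instance

-- ===== CLAIM (what is proved, stated in full; the proofs are below) =====
def Claim_equal_check_potential_solution : Prop := ∀ (list_numbers : List Int) (solution_test : Int), Dom_check_potential_solution list_numbers solution_test → Pre_check_potential_solution list_numbers solution_test → Spec_check_potential_solution list_numbers solution_test (check_potential_solution list_numbers solution_test)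

-- ===== LEMMAS AND PROOFS =====

-- membership in one round of A's step
theorem mem_a_step (t n : Int) (ps : List Int) (v : Int) :
    v ∈ ((ps.filter (fun p => p ≤ t)).map (fun p => p + n)) ++
        ((ps.filter (fun p => p ≤ t)).map (fun p => p * n)) ↔
      ∃ p ∈ ps, p ≤ t ∧ (v = p + n ∨ v = p * n) := by
  simp only [List.mem_append, List.mem_map, List.mem_filter, decide_eq_true_eq]
  constructor
  · rintro (⟨p, ⟨hp, hpt⟩, rfl⟩ | ⟨p, ⟨hp, hpt⟩, rfl⟩)
    · exact ⟨p, hp, hpt, Or.inl rfl⟩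
    · exact ⟨p, hp, hpt, Or.inr rfl⟩
  · rintro ⟨p, hp, hpt, rfl | rfl⟩
    · exact Or.inl ⟨p, ⟨hp, hpt⟩, rfl⟩
    · exact Or.inr ⟨p, ⟨hp, hpt⟩, rfl⟩

-- A's breadth-first fold contains the target iff B's depth-first search
-- succeeds from some value of the current frontier.
theorem fold_mem_iff_dfs (t : Int) (rest : List Int) (ps : List Int) :
    (t ∈ rest.foldl (fun ps number =>
        ((ps.filter (fun p => p ≤ t)).map (fun p => p + number)) ++
        ((ps.filter (fun p => p ≤ t)).map (fun p => p * number))) ps) ↔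
      ∃ p ∈ ps, cpsGo t p rest = true := by
  induction rest generalizing ps with
  | nil =>
    simp only [List.foldl_nil, cpsGo]
    constructor
    · intro h; exact ⟨t, h, by simp⟩
    · rintro ⟨p, hp, hd⟩
      simp only [decide_eq_true_eq] at hd
      exact hd ▸ hp
  | cons n rest ih =>
    simp only [List.foldl_cons, ih]
    constructor
    · rintro ⟨q, hq, hd⟩
      rw [mem_a_step] at hq
      obtain ⟨p, hp, hpt, hv⟩ := hq
      refine ⟨p, hp, ?_⟩
      have hng : ¬ p > t := by omega
      simp only [cpsGo, if_neg hng, Bool.or_eq_true]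
      rcases hv with rfl | rfl
      · exact Or.inl hd
      · exact Or.inr hd
    · rintro ⟨p, hp, hd⟩
      simp only [cpsGo] at hd
      by_cases hpt : p > t
      · simp [hpt] at hd
      · simp only [if_neg hpt, Bool.or_eq_true] at hd
        rcases hd with hd | hd
        · exact ⟨p + n, (mem_a_step t n ps (p + n)).mpr ⟨p, hp, by omega, Or.inl rfl⟩, hd⟩
        · exact ⟨p * n, (mem_a_step t n ps (p * n)).mpr ⟨p, hp, by omega, Or.inr rfl⟩, hd⟩

-- ===== VERDICT (by name: the statement is the Claim_ definition above) =====
theorem check_potential_solution_spec : Claim_equal_check_potential_solution := by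
  intro list_numbers solution_test _ hpre
  unfold Spec_check_potential_solution check_potential_solution check_potential_solution_alt
  match list_numbers with
  | [] => exact absurd rfl hpre
  | x :: rest =>
    simp only
    rw [Bool.eq_iff_iff]
    simp only [decide_eq_true_eq]
    rw [fold_mem_iff_dfs]
    constructor
    · rintro ⟨p, hp, hd⟩
      simp only [List.mem_singleton] at hp
      exact hp ▸ hd
    · intro h; exact ⟨x, List.mem_singleton_self x, h⟩
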